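-- pv_equiv track=rewrite | github.com/Dhyey2294/Chatbot | backend/services/scraper_firecrawl.py | _merge_images
-- ===== SOURCE A (Python) =====
-- _MAX_IMAGES_PER_CHUNK = 4
--
-- def _merge_images(image_map: dict, keys: list) -> list:
--     """Merge image URLs from the given keys, deduplicate, and cap at _MAX_IMAGES_PER_CHUNK."""
--     seen = set()
--     result = []
--     for key in keys:
--         for url in image_map.get(key, []):
--             if url not in seen:
--                 seen.add(url)
--                 result.append(url)
--                 if len(result) >= _MAX_IMAGES_PER_CHUNK:
--                     return result
--     return result
-- ===== SOURCE B (Python) =====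
-- _MAX_IMAGES_PER_CHUNK = 4
--
-- def _merge_images(image_map: dict, keys: list) -> list:
--     """Flatten all URLs for the keys, dedup in first-seen order via dict.fromkeys, then cap at 4."""
--     urls = []
--     for key in keys:
--         urls.extend(image_map.get(key, []))
--     return list(dict.fromkeys(urls))[:_MAX_IMAGES_PER_CHUNK]
-- ===== Notes on version B (the rewrite author's own statement) =====
-- stated objective: simpler
-- what changed: Replaced the single-pass set-tracking loop with early return by a two-phase decomposition: flatten every key's URL list, dedup in first-seen order with dict.fromkeys, then slice the first 4.
import Mathlib
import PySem

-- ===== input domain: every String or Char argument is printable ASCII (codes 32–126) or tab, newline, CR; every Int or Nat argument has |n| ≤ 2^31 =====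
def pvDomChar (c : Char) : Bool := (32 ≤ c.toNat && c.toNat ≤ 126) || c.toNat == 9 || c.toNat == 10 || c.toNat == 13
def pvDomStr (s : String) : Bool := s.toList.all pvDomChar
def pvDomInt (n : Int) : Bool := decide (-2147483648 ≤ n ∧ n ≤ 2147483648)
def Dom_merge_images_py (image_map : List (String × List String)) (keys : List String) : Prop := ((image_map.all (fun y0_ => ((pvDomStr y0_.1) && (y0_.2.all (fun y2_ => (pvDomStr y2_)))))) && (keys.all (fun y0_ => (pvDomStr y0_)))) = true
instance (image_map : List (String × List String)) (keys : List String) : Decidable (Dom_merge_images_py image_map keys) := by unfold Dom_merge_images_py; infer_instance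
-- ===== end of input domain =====

-- B replaces A's single-pass seen-set loop with early return by a two-phase
-- decomposition (flatten all URLs, dedup in first-seen order, cap at 4); simpler, same cost.

-- ===== PORT A =====
-- inner 'for url in image_map.get(key, [])' loop; Bool flag = the early 'return result' fired
def mergeAUrls (seen : PySem.Set String) (result : List String) :
    List String → PySem.Set String × List String × Bool
  | [] => (seen, result, false)
  | u :: us =>
    if PySem.Set.contains seen u then mergeAUrls seen result us
    else
      let seen' := PySem.Set.add seen u
      let result' := result ++ [u]
      if 4 ≤ result'.length then (seen', result', true)
      else mergeAUrls seen' result' us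

-- outer 'for key in keys' loop
def mergeAKeys (image_map : List (String × List String)) (seen : PySem.Set String)
    (result : List String) : List String → List String
  | [] => result
  | k :: ks =>
    match mergeAUrls seen result (PySem.Dict.getD ⟨image_map⟩ k []) with
    | (_, r', true) => r'
    | (s', r', false) => mergeAKeys image_map s' r' ks

def merge_images_py (image_map : List (String × List String)) (keys : List String) : List String :=
  mergeAKeys image_map PySem.Set.empty [] keys

-- ===== PORT B =====
def merge_images_py_alt (image_map : List (String × List String)) (keys : List String) : List String :=
  let urls := keys.foldl (fun acc k => acc ++ PySem.Dict.getD ⟨image_map⟩ k []) []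
  (PySem.List.dedup urls).take 4

-- ===== PRECONDITION & SPEC =====
def Spec_merge_images_py (image_map : List (String × List String)) (keys : List String) (out : List String) : Prop := out = merge_images_py_alt image_map keys
instance (image_map : List (String × List String)) (keys : List String) (out : List String) : Decidable (Spec_merge_images_py image_map keys out) := by unfold Spec_merge_images_py; infer_instance

-- ===== CLAIM (what is proved, stated in full; the proofs are below) =====
def Claim_equal_merge_images_py : Prop := ∀ (image_map : List (String × List String)) (keys : List String), Dom_merge_images_py image_map keys → Spec_merge_images_py image_map keys (merge_images_py image_map keys)

-- ===== LEMMAS AND PROOFS =====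

-- dedup of `us` relative to an already-seen set
def ddSeen (seen : PySem.Set String) : List String → List String
  | [] => []
  | u :: us =>
    if PySem.Set.contains seen u then ddSeen seen us
    else u :: ddSeen (PySem.Set.add seen u) us

lemma update_eq_append_ddSeen (us : List String) :
    ∀ seen : PySem.Set String, PySem.Set.update seen us = seen ++ ddSeen seen us := by
  induction us with
  | nil => intro seen; simp [PySem.Set.update, ddSeen]
  | cons u us ih =>
    intro seen
    rw [PySem.Set.update_cons, ddSeen]
    by_cases h : u ∈ seen
    · have hc : PySem.Set.contains seen u = true := (PySem.Set.contains_iff seen u).2 h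
      rw [PySem.Set.add_of_mem h, ih, hc]
      simp
    · have hc : PySem.Set.contains seen u = false := by
        simpa [PySem.Set.contains_eq_listContains] using h
      rw [PySem.Set.add_of_not_mem h, ih, hc]
      simp

lemma ddSeen_empty_eq_dedup (us : List String) :
    ddSeen PySem.Set.empty us = PySem.List.dedup us := by
  have h := update_eq_append_ddSeen us PySem.Set.empty
  rw [show (PySem.Set.empty : PySem.Set String) = [] from rfl, PySem.Set.update_nil_left] at h
  simpa [PySem.List.dedup_eq_ofList] using h.symm

-- early return behaves like take 4 over the seen-relative dedup
lemma mergeAUrls_result (us : List String) :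
    ∀ (seen : PySem.Set String) (result : List String), result.length < 4 →
      (mergeAUrls seen result us).2.1 = (result ++ ddSeen seen us).take 4 := by
  induction us with
  | nil =>
    intro seen result h
    simp [mergeAUrls, ddSeen, List.take_of_length_le (by omega : result.length ≤ 4)]
  | cons u us ih =>
    intro seen result h
    rw [mergeAUrls, ddSeen]
    by_cases hc : PySem.Set.contains seen u
    · simp only [hc, if_true]; exact ih seen result h
    · simp only [hc, Bool.false_eq_true, if_false]
      by_cases h4 : 4 ≤ (result ++ [u]).length
      · simp only [h4, if_true]
        have hlen : (result ++ [u]).length = 4 := by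
          simp at h4 ⊢; omega
        rw [show result ++ u :: ddSeen (PySem.Set.add seen u) us
              = (result ++ [u]) ++ ddSeen (PySem.Set.add seen u) us by simp]
        rw [← hlen, List.take_left]
      · simp only [h4, if_false]
        have := ih (PySem.Set.add seen u) (result ++ [u]) (by simp at h4 ⊢; omega)
        rw [this]; simp

-- processing a concatenation = process the first part, then (unless returned) the rest
lemma mergeAUrls_append (xs ys : List String) :
    ∀ (seen : PySem.Set String) (result : List String),
      mergeAUrls seen result (xs ++ ys) =
        match mergeAUrls seen result xs with
        | (s', r', true) => (s', r', true)
        | (s', r', false) => mergeAUrls s' r' ys := by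
  induction xs with
  | nil => intro seen result; simp [mergeAUrls]
  | cons x xs ih =>
    intro seen result
    rw [List.cons_append, mergeAUrls, mergeAUrls]
    by_cases hc : PySem.Set.contains seen x
    · simp only [hc, if_true]; exact ih seen result
    · simp only [hc, Bool.false_eq_true, if_false]
      by_cases h4 : 4 ≤ (result ++ [x]).length
      · simp only [h4, if_true]
      · simp only [h4, if_false]; exact ih _ _

-- the nested key loop = the inner loop run on the flattened URL list
lemma mergeAKeys_eq_flat (image_map : List (String × List String)) (ks : List String) :
    ∀ (seen : PySem.Set String) (result : List String),
      mergeAKeys image_map seen result ks =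
        (mergeAUrls seen result (ks.flatMap (fun k => PySem.Dict.getD ⟨image_map⟩ k []))).2.1 := by
  induction ks with
  | nil => intro seen result; simp [mergeAKeys, mergeAUrls]
  | cons k ks ih =>
    intro seen result
    rw [mergeAKeys, List.flatMap_cons, mergeAUrls_append]
    rcases hm : mergeAUrls seen result (PySem.Dict.getD ⟨image_map⟩ k []) with ⟨s', r', b⟩
    cases b with
    | true => simp
    | false => simpa using ih s' r'

-- ===== VERDICT (by name: the statement is the Claim_ definition above) =====
theorem merge_images_py_spec : Claim_equal_merge_images_py := by
  intro image_map keys _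
  unfold Spec_merge_images_py merge_images_py merge_images_py_alt
  rw [mergeAKeys_eq_flat, mergeAUrls_result _ _ _ (by simp),
      PySem.List.foldl_append_eq_flatMap]
  simp only [List.nil_append, ddSeen_empty_eq_dedup]
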